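-- pv_equiv track=rewrite | github.com/almanjenga/menstrual-health-chatbot | is_project2_final/is_project2/backend/app.py | summarize_context
-- ===== SOURCE A (Python) =====
-- def summarize_context(context, max_words=120):
--     """Summarize context to max_words, keeping most relevant information"""
--     if not context:
--         return ""
--
--     # Split into sentences
--     sentences = context.split('.')
--     sentences = [s.strip() for s in sentences if s.strip()]
--
--     # Count words
--     word_count = 0
--     selected_sentences = []
--
--     for sent in sentences:
--         words = sent.split()
--         if word_count + len(words) <= max_words:
--             selected_sentences.append(sent)
--             word_count += len(words)
--         else:
--             # If adding this sentence would exceed limit, check if it's short enough to fit partially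
--             remaining = max_words - word_count
--             if remaining > 20:  # Only if we have significant space left
--                 # Take first part of sentence
--                 words_to_take = words[:remaining]
--                 if words_to_take:
--                     selected_sentences.append(' '.join(words_to_take))
--             break
--
--     return '. '.join(selected_sentences)
-- ===== SOURCE B (Python) =====
-- def summarize_context(context, max_words=120):
--     """Summarize context to max_words: prefix-sum the per-sentence word counts,
--     locate the cutoff index, then assemble the result in one slice + optional tail."""
--     if not context:
--         return ""
--     sentences = [t for t in (s.strip() for s in context.split('.')) if t]
--     word_lists = [s.split() for s in sentences]
--     prefix = [0]
--     total = 0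
--     for w in word_lists:
--         total += len(w)
--         prefix.append(total)
--     i = 0
--     while i < len(sentences) and prefix[i + 1] <= max_words:
--         i += 1
--     parts = sentences[:i]
--     if i < len(sentences):
--         remaining = max_words - prefix[i]
--         if remaining > 20:
--             parts = parts + [' '.join(word_lists[i][:remaining])]
--     return '. '.join(parts)
-- ===== Notes on version B (the rewrite author's own statement) =====
-- stated objective: alternative
-- what changed: Replaces A's single accumulate-and-break loop with a two-phase plan: build a prefix-sum array of per-sentence word counts, locate the cutoff index by scanning the prefix sums, then assemble the output as one list slice plus an optional partial boundary sentence.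
import Mathlib
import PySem

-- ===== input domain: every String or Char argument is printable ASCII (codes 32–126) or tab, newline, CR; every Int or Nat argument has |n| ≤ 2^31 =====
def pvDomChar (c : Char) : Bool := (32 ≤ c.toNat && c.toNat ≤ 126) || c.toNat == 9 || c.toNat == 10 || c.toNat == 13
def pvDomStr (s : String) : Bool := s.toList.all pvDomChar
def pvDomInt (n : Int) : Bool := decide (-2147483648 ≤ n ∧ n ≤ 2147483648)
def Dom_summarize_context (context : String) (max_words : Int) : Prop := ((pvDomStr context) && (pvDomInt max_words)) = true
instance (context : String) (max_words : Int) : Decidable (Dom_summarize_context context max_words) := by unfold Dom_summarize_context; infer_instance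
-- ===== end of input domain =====

-- B replaces A's accumulate-and-break loop by prefix sums + cutoff index + slice assembly (alternative decomposition, same cost).

-- ===== PORT A =====
def scA_loop (max_words : Int) : List String → Int → List String → List String
  | [], _, sel => sel
  | sent :: rest, wc, sel =>
    let words := PySem.Str.split₀ sent
    if wc + PySem.List.len words ≤ max_words then
      scA_loop max_words rest (wc + PySem.List.len words) (sel ++ [sent])
    else
      let remaining := max_words - wc
      if remaining > 20 then
        let words_to_take := PySem.List.slice words none (some remaining)
        if words_to_take ≠ [] then sel ++ [PySem.Str.join " " words_to_take] else sel
      else sel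

def summarize_context (context : String) (max_words : Int) : String :=
  if context == "" then "" else
  let sentences := (((PySem.Str.split? context ".").getD []).map PySem.Str.strip).filter (fun s => !(s == ""))
  PySem.Str.join ". " (scA_loop max_words sentences 0 [])

-- ===== PORT B =====
def scB_prefix (wordLists : List (List String)) : List Int :=
  (wordLists.foldl
    (fun tp w => (tp.1 + PySem.List.len w, tp.2 ++ [tp.1 + PySem.List.len w]))
    ((0 : Int), [(0 : Int)])).2

def scB_cut (n : Nat) (pfx : List Int) (max_words : Int) (i : Nat) : Nat :=
  if h : i < n ∧ PySem.List.pyGetD pfx ((i + 1 : Nat) : Int) 0 ≤ max_words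
  then scB_cut n pfx max_words (i + 1)
  else i
termination_by n - i
decreasing_by omega

def summarize_context_alt (context : String) (max_words : Int) : String :=
  if context == "" then "" else
  let sentences := (((PySem.Str.split? context ".").getD []).map PySem.Str.strip).filter (fun s => !(s == ""))
  let wordLists := sentences.map PySem.Str.split₀
  let pfx := scB_prefix wordLists
  let i := scB_cut sentences.length pfx max_words 0
  let parts := PySem.List.slice sentences none (some ((i : Nat) : Int))
  let parts :=
    if i < sentences.length then
      let remaining := max_words - PySem.List.pyGetD pfx ((i : Nat) : Int) 0
      if remaining > 20 then
        parts ++ [PySem.Str.join " " (PySem.List.slice (PySem.List.pyGetD wordLists ((i : Nat) : Int) []) none (some remaining))]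
      else parts
    else parts
  PySem.Str.join ". " parts

-- ===== PRECONDITION & SPEC =====
def Spec_summarize_context (context : String) (max_words : Int) (out : String) : Prop := out = summarize_context_alt context max_words
instance (context : String) (max_words : Int) (out : String) : Decidable (Spec_summarize_context context max_words out) := by unfold Spec_summarize_context; infer_instance

-- ===== CLAIM (what is proved, stated in full; the proofs are below) =====
def Claim_equal_summarize_context : Prop := ∀ (context : String) (max_words : Int), Dom_summarize_context context max_words → Spec_summarize_context context max_words (summarize_context context max_words)

-- ===== LEMMAS AND PROOFS =====

/-- Common characterization of the selected parts list. -/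
def scSpec (mw : Int) : List String → List String
  | [] => []
  | s :: ss =>
    let n : Int := (PySem.Str.split₀ s).length
    if n ≤ mw then s :: scSpec (mw - n) ss
    else if mw > 20 then [PySem.Str.join " " ((PySem.Str.split₀ s).take mw.toNat)] else []

theorem scA_loop_eq (mw : Int) (ss : List String) : ∀ (wc : Int) (sel : List String),
    scA_loop mw ss wc sel = sel ++ scSpec (mw - wc) ss := by
  induction ss with
  | nil => intro wc sel; simp [scA_loop, scSpec]
  | cons s ss ih =>
    intro wc sel
    simp only [scA_loop, scSpec, PySem.List.len_eq]
    set n : Int := ((PySem.Str.split₀ s).length : Int) with hn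
    by_cases h : wc + n ≤ mw
    · rw [if_pos h, if_pos (by omega : n ≤ mw - wc), ih]
      have : mw - (wc + n) = mw - wc - n := by ring
      simp [this]
    · rw [if_neg h, if_neg (by omega : ¬ n ≤ mw - wc)]
      by_cases h2 : mw - wc > 20
      · rw [if_pos h2, if_pos h2]
        have hlen : (20 : Int) < n := by omega
        have hnn : (0:ℤ) ≤ mw - wc := by omega
        have hslice : PySem.List.slice (PySem.Str.split₀ s) none (some (mw - wc))
            = (PySem.Str.split₀ s).take (mw - wc).toNat := by
          rw [PySem.List.slice_to]
          exact hnn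
        rw [hslice]
        have hne : (PySem.Str.split₀ s).take (mw - wc).toNat ≠ [] := by
          rw [Ne, List.take_eq_nil_iff]
          rintro (h0 | h0)
          · omega
          · have hz : (PySem.Str.split₀ s).length = 0 := by simp [h0]
            omega
        rw [if_pos hne]
      · rw [if_neg h2, if_neg h2]; simp

/-- Running sums of word counts starting from offset t. -/
def scRuns (t : Int) : List (List String) → List Int
  | [] => []
  | w :: ws => (t + (w.length : Int)) :: scRuns (t + (w.length : Int)) ws

theorem scRuns_length (ws : List (List String)) : ∀ t, (scRuns t ws).length = ws.length := by
  induction ws with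
  | nil => intro t; simp [scRuns]
  | cons w ws ih => intro t; simp [scRuns, ih]

theorem scB_prefix_aux (ws : List (List String)) : ∀ (t : Int) (p : List Int),
    (ws.foldl (fun tp w => (tp.1 + PySem.List.len w, tp.2 ++ [tp.1 + PySem.List.len w])) (t, p)).2
      = p ++ scRuns t ws := by
  induction ws with
  | nil => intro t p; simp [scRuns]
  | cons w ws ih =>
    intro t p
    simp only [List.foldl_cons]
    rw [ih]
    simp [scRuns]

theorem scB_prefix_eq (ws : List (List String)) : scB_prefix ws = 0 :: scRuns 0 ws := by
  unfold scB_prefix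
  rw [scB_prefix_aux]
  rfl

theorem scB_cut_eq (pfx : List Int) (mw : Int) (n : Nat) (hp : pfx.length = n + 1) :
    ∀ i, i ≤ n →
    scB_cut n pfx mw i = i + (List.takeWhile (fun x => decide (x ≤ mw)) (pfx.drop (i + 1))).length := by
  intro i hi
  induction hfuel : n - i generalizing i with
  | zero =>
    have hin : i = n := by omega
    rw [scB_cut]
    rw [dif_neg (by omega)]
    subst hin
    rw [List.drop_eq_nil_of_le (by omega)]
    simp
  | succ k ih =>
    have hin : i < n := by omega
    have hlt : i + 1 < pfx.length := by omega
    have hdrop : pfx.drop (i + 1) = pfx[i + 1] :: pfx.drop (i + 1 + 1) := List.drop_eq_getElem_cons hlt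
    have hg : PySem.List.pyGetD pfx ((i + 1 : Nat) : Int) 0 = pfx[i + 1] := by
      rw [PySem.List.pyGetD_natCast, List.getD_eq_getElem _ _ hlt]
    rw [scB_cut]
    by_cases h : PySem.List.pyGetD pfx ((i + 1 : Nat) : Int) 0 ≤ mw
    · rw [dif_pos ⟨hin, h⟩, ih (i + 1) (by omega) (by omega)]
      rw [hg] at h
      rw [hdrop, List.takeWhile_cons_of_pos (by simpa using h)]
      simp only [List.length_cons]
      omega
    · rw [dif_neg (by tauto)]
      rw [hg] at h
      rw [hdrop, List.takeWhile_cons_of_neg (by simpa using h)]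
      simp

theorem scMain (mw : Int) (ss : List String) : ∀ (t : Int),
    (let ws := ss.map PySem.Str.split₀
     let r := scRuns t ws
     let c := (List.takeWhile (fun x => decide (x ≤ mw)) r).length
     ss.take c ++
       (if c < ss.length then
          (if mw - ((t :: r).getD c 0) > 20
           then [PySem.Str.join " " ((ws.getD c []).take (mw - (t :: r).getD c 0).toNat)]
           else [])
        else []))
    = scSpec (mw - t) ss := by
  induction ss with
  | nil => intro t; simp [scRuns, scSpec]
  | cons s ss ih =>
    intro t
    simp only [List.map_cons, scRuns, scSpec]
    set n : Int := ((PySem.Str.split₀ s).length : Int) with hn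
    by_cases h : n ≤ mw - t
    · rw [List.takeWhile_cons_of_pos (by simp; omega)]
      rw [if_pos h]
      have hih := ih (t + n)
      simp only at hih
      have harr : mw - t - n = mw - (t + n) := by ring
      rw [harr, ← hih]
      simp only [List.length_cons, List.take_succ_cons, List.getD_cons_succ,
        Nat.succ_lt_succ_iff, List.cons_append]
    · rw [List.takeWhile_cons_of_neg (by simp; omega)]
      rw [if_neg h]
      simp only [List.length_nil, List.take_zero, List.nil_append, List.length_cons,
        List.getD_cons_zero]
      rw [if_pos (by simp)]

theorem scParts_eq (mw : Int) (ss : List String) :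
    (let wordLists := ss.map PySem.Str.split₀
     let pfx := scB_prefix wordLists
     let i := scB_cut ss.length pfx mw 0
     let parts := PySem.List.slice ss none (some ((i : Nat) : Int))
     if i < ss.length then
       (if mw - PySem.List.pyGetD pfx ((i : Nat) : Int) 0 > 20 then
          parts ++ [PySem.Str.join " " (PySem.List.slice (PySem.List.pyGetD wordLists ((i : Nat) : Int) []) none (some (mw - PySem.List.pyGetD pfx ((i : Nat) : Int) 0)))]
        else parts)
     else parts)
    = scSpec mw ss := by
  simp only []
  set ws := ss.map PySem.Str.split₀ with hws
  have hpfx : scB_prefix ws = 0 :: scRuns 0 ws := scB_prefix_eq ws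
  have hplen : (scB_prefix ws).length = ss.length + 1 := by
    rw [hpfx]; simp [scRuns_length, hws]
  have hcut := scB_cut_eq (scB_prefix ws) mw ss.length hplen 0 (by omega)
  set r := scRuns 0 ws with hr
  have hdrop1 : (scB_prefix ws).drop 1 = r := by rw [hpfx]; rfl
  set c := (List.takeWhile (fun x => decide (x ≤ mw)) r).length with hc
  have hcut' : scB_cut ss.length (scB_prefix ws) mw 0 = c := by
    rw [hcut, hdrop1]; omega
  have hclen : c ≤ ss.length := by
    have h1 := (List.takeWhile_prefix (p := fun x => decide (x ≤ mw)) (l := r)).length_le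
    have hrlen : r.length = ss.length := by rw [hr, scRuns_length, hws, List.length_map]
    omega
  rw [hcut']
  have hslice : PySem.List.slice ss none (some ((c : Nat) : Int)) = ss.take c :=
    PySem.List.slice_to_natCast ss c
  have hgpfx : PySem.List.pyGetD (scB_prefix ws) ((c : Nat) : Int) 0 = (0 :: r).getD c 0 := by
    rw [PySem.List.pyGetD_natCast, hpfx]
  have hmain := scMain mw ss 0
  simp only [sub_zero] at hmain
  rw [← hws, ← hr, ← hc] at hmain
  rw [hslice, hgpfx]
  by_cases hlt : c < ss.length
  · rw [if_pos hlt]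
    have hwl : PySem.List.pyGetD ws ((c : Nat) : Int) [] = ws.getD c [] := by
      rw [PySem.List.pyGetD_natCast]
    rw [hwl]
    by_cases h20 : mw - (0 :: r).getD c 0 > 20
    · rw [if_pos h20]
      have hslice2 : PySem.List.slice (ws.getD c []) none (some (mw - (0 :: r).getD c 0))
          = (ws.getD c []).take (mw - (0 :: r).getD c 0).toNat := by
        rw [PySem.List.slice_to]
        omega
      rw [hslice2, ← hmain]
      rw [if_pos hlt, if_pos h20]
    · rw [if_neg h20, ← hmain, if_pos hlt, if_neg h20]
      simp
  · rw [if_neg hlt, ← hmain, if_neg hlt]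
    simp

-- ===== VERDICT (by name: the statement is the Claim_ definition above) =====
theorem summarize_context_spec : Claim_equal_summarize_context := by
  intro context max_words _
  unfold Spec_summarize_context summarize_context summarize_context_alt
  by_cases hc : context == ""
  · rw [if_pos hc, if_pos hc]
  · rw [if_neg hc, if_neg hc]
    dsimp only
    rw [scA_loop_eq]
    have h0 : max_words - 0 = max_words := by ring
    rw [h0, List.nil_append]
    have hparts := scParts_eq max_words
      ((((PySem.Str.split? context ".").getD []).map PySem.Str.strip).filter (fun s => !(s == "")))
    dsimp only at hparts
    rw [← hparts]
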